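-- pv_equiv track=rewrite | github.com/bloomingstars/privacy | HW1/sdinaka_HW1.py | calc_p
-- ===== SOURCE A (Python) =====
-- def calc_p(db,aux):
--     maxi={}
--     mini={}
--     p={}
--     table=["03124", "06315", "07242", "16944", "17113", "10935", "11977", "03276", "14199", "08191", "06004", "01292", "15267", "03768", "02137"]
--     for item,aux_val in aux.items():
--         maxi[item]=aux_val
--         mini[item]=aux_val
--     for user,di in db.items():
--         if(di is not None):
--             for movie,rating in di.items():
--                 if movie in aux.keys() and rating!=None and rating>=0:
--                     if(maxi.get(movie)<rating):
--                         maxi[movie]=rating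
--                     if(mini.get(movie)>rating):
--                         mini[movie]=rating
--     for movie in aux:
--         p[movie]=maxi.get(movie)-mini.get(movie)
--     return p
--     pass
-- ===== SOURCE B (Python) =====
-- def calc_p(db, aux):
--     vals = {movie: [aux_val] for movie, aux_val in aux.items()}
--     for di in db.values():
--         if di is not None:
--             for movie, rating in di.items():
--                 if movie in vals and rating is not None and rating >= 0:
--                     vals[movie].append(rating)
--     return {movie: max(vs) - min(vs) for movie, vs in vals.items()}
-- ===== Notes on version B (the rewrite author's own statement) =====
-- stated objective: simpler
-- what changed: Replaces the two running max/min dicts updated with guarded comparisons by a collect-then-reduce decomposition: group each movie's aux value plus qualifying ratings into one list, then take max-min per list; the unused table constant is dropped.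
import Mathlib
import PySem

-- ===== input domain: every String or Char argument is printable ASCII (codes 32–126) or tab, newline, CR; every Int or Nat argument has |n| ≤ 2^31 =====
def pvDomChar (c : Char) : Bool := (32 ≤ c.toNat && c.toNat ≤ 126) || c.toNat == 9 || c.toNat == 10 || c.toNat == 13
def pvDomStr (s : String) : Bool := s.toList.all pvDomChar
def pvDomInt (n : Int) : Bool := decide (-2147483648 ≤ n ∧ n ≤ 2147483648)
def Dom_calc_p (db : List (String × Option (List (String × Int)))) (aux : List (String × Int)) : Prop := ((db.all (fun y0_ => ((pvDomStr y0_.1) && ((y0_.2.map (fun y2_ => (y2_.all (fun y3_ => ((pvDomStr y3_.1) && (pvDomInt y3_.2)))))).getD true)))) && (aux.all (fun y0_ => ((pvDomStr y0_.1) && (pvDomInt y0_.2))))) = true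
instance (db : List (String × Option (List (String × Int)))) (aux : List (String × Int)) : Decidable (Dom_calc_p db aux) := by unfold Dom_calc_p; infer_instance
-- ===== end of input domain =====

-- B replaces A's running max/min dicts by grouping each movie's aux value and qualifying
-- ratings into one list and taking max-min per list (collect-then-reduce); objective: simpler.

-- ===== PORT A =====
-- inner-loop body of A's db loop: the guarded running max/min update
-- ('rating != None' is always true for an Int rating; maxi.get/mini.get always hit a key
-- seeded from aux because of the 'movie in aux.keys()' guard, so the getD default is never read)
def calc_p_stepA (aux : List (String × Int)) (s : PySem.Dict String Int × PySem.Dict String Int)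
    (mr : String × Int) : PySem.Dict String Int × PySem.Dict String Int :=
  if (aux.map Prod.fst).contains mr.1 && decide (mr.2 ≥ 0) then
    let s1 := if s.1.getD mr.1 0 < mr.2 then (s.1.insert mr.1 mr.2, s.2) else s
    if s1.2.getD mr.1 0 > mr.2 then (s1.1, s1.2.insert mr.1 mr.2) else s1
  else s

-- one iteration of A's outer db loop ('if di is not None: for movie, rating in di.items(): …')
def calc_p_rowA (aux : List (String × Int)) (s : PySem.Dict String Int × PySem.Dict String Int)
    (ud : String × Option (List (String × Int))) : PySem.Dict String Int × PySem.Dict String Int :=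
  match ud.2 with
  | none => s
  | some di => di.foldl (calc_p_stepA aux) s

def calc_p (db : List (String × Option (List (String × Int)))) (aux : List (String × Int)) : List (String × Int) :=
  let _table : List String := ["03124", "06315", "07242", "16944", "17113", "10935", "11977", "03276", "14199", "08191", "06004", "01292", "15267", "03768", "02137"]
  let seeded := aux.foldl (fun s kv => (s.1.insert kv.1 kv.2, s.2.insert kv.1 kv.2))
    ((PySem.Dict.empty : PySem.Dict String Int), (PySem.Dict.empty : PySem.Dict String Int))
  let fin := db.foldl (calc_p_rowA aux) seeded
  (aux.foldl (fun (p : PySem.Dict String Int) kv => p.insert kv.1 (fin.1.getD kv.1 0 - fin.2.getD kv.1 0)) PySem.Dict.empty).items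

-- ===== PORT B =====
-- inner-loop body of B's db loop: append the rating to the movie's group
-- (the key is present whenever the guard holds, so modify's default [] is never read)
def calc_p_stepB (v : PySem.Dict String (List Int)) (mr : String × Int) : PySem.Dict String (List Int) :=
  if v.contains mr.1 && decide (mr.2 ≥ 0) then v.modify mr.1 [] (fun l => l ++ [mr.2]) else v

def calc_p_rowB (v : PySem.Dict String (List Int)) (ud : String × Option (List (String × Int))) : PySem.Dict String (List Int) :=
  match ud.2 with
  | none => v
  | some di => di.foldl calc_p_stepB v

def calc_p_alt (db : List (String × Option (List (String × Int)))) (aux : List (String × Int)) : List (String × Int) :=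
  let vals := aux.foldl (fun (d : PySem.Dict String (List Int)) kv => d.insert kv.1 [kv.2]) PySem.Dict.empty
  let vals := db.foldl calc_p_rowB vals
  -- max(vs)/min(vs): each group is nonempty (seeded with the aux value), so the getD default is never read
  (vals.items.foldl (fun (p : PySem.Dict String Int) kv =>
      p.insert kv.1 ((PySem.List.max? kv.2 (fun x => x)).getD 0 - (PySem.List.min? kv.2 (fun x => x)).getD 0))
    PySem.Dict.empty).items

-- ===== PRECONDITION & SPEC =====
def Spec_calc_p (db : List (String × Option (List (String × Int)))) (aux : List (String × Int)) (out : List (String × Int)) : Prop := out = calc_p_alt db aux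
instance (db : List (String × Option (List (String × Int)))) (aux : List (String × Int)) (out : List (String × Int)) : Decidable (Spec_calc_p db aux out) := by unfold Spec_calc_p; infer_instance

-- ===== CLAIM (what is proved, stated in full; the proofs are below) =====
def Claim_equal_calc_p : Prop := ∀ (db : List (String × Option (List (String × Int)))) (aux : List (String × Int)), Dom_calc_p db aux → Spec_calc_p db aux (calc_p db aux)

-- ===== LEMMAS AND PROOFS =====

-- max/min of a group extended by one element
theorem pv_max_append (l : List Int) (M r : Int)
    (h : PySem.List.max? l (fun x => x) = some M) :
    PySem.List.max? (l ++ [r]) (fun x => x) = some (max M r) := by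
  cases l with
  | nil => rw [(PySem.List.max?_eq_none_iff [] (fun x : Int => x)).mpr rfl] at h; cases h
  | cons x t =>
    rw [PySem.List.max?_id_cons] at h
    obtain rfl : M = t.foldl max x := (Option.some.inj h).symm
    rw [List.cons_append, PySem.List.max?_id_cons, List.foldl_append]
    simp

theorem pv_min_append (l : List Int) (M r : Int)
    (h : PySem.List.min? l (fun x => x) = some M) :
    PySem.List.min? (l ++ [r]) (fun x => x) = some (min M r) := by
  cases l with
  | nil =>
    have : PySem.List.min? ([] : List Int) (fun x => x) = none := by
      simp [PySem.List.min?]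
    rw [this] at h; cases h
  | cons x t =>
    rw [PySem.List.min?_id_cons] at h
    obtain rfl : M = t.foldl min x := (Option.some.inj h).symm
    rw [List.cons_append, PySem.List.min?_id_cons, List.foldl_append]
    simp

-- the coupling invariant: maxi/mini hold exactly the running max/min of B's groups
def calcInv (aux : List (String × Int)) (ma mi : PySem.Dict String Int)
    (v : PySem.Dict String (List Int)) : Prop :=
  ma.keys = v.keys ∧ mi.keys = v.keys ∧ v.keys.Nodup ∧
  v.keys = PySem.Set.ofList (aux.map Prod.fst) ∧
  ∀ m : String, v.contains m = true →
    PySem.List.max? (v.getD m []) (fun x => x) = some (ma.getD m 0) ∧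
    PySem.List.min? (v.getD m []) (fun x => x) = some (mi.getD m 0)

-- the two seeding loops produce pointwise-singleton-related dicts
theorem pv_seed_get? (aux : List (String × Int)) :
    ∀ (d : PySem.Dict String Int) (v : PySem.Dict String (List Int)),
    (∀ m, v.get? m = (d.get? m).map (fun x => [x])) →
    ∀ m, (aux.foldl (fun v kv => v.insert kv.1 [kv.2]) v).get? m
        = ((aux.foldl (fun d kv => d.insert kv.1 kv.2) d).get? m).map (fun x => [x]) := by
  induction aux with
  | nil => intro d v h m; exact h m
  | cons kv t ih =>
    intro d v h m
    simp only [List.foldl_cons]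
    refine ih _ _ (fun m' => ?_) m
    rw [PySem.Dict.get?_insert, PySem.Dict.get?_insert]
    by_cases hm : m' = kv.1 <;> simp [hm, h m']

theorem pv_seed_inv (aux : List (String × Int)) :
    calcInv aux
      (aux.foldl (fun d kv => d.insert kv.1 kv.2) PySem.Dict.empty)
      (aux.foldl (fun d kv => d.insert kv.1 kv.2) PySem.Dict.empty)
      (aux.foldl (fun d kv => d.insert kv.1 [kv.2]) PySem.Dict.empty) := by
  have hget := pv_seed_get? aux PySem.Dict.empty PySem.Dict.empty
    (by intro m; rw [PySem.Dict.get?_empty, PySem.Dict.get?_empty]; rfl)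
  have hkd : (aux.foldl (fun d kv => d.insert kv.1 kv.2) (PySem.Dict.empty : PySem.Dict String Int)).keys
      = PySem.Set.update PySem.Dict.empty.keys (aux.map Prod.fst) :=
    PySem.Dict.keys_foldl_insert_key aux Prod.fst (fun _ kv => kv.2) _
  have hkv : (aux.foldl (fun d kv => d.insert kv.1 [kv.2]) (PySem.Dict.empty : PySem.Dict String (List Int))).keys
      = PySem.Set.update PySem.Dict.empty.keys (aux.map Prod.fst) :=
    PySem.Dict.keys_foldl_insert_key aux Prod.fst (fun _ kv => [kv.2]) _
  have hof : PySem.Set.update (PySem.Dict.empty : PySem.Dict String Int).keys (aux.map Prod.fst)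
      = PySem.Set.ofList (aux.map Prod.fst) := by
    rw [PySem.Set.ofList_eq_foldl, PySem.Dict.keys_empty]; rfl
  refine ⟨?_, ?_, ?_, ?_, ?_⟩
  · rw [hkd, hkv]; rw [PySem.Dict.keys_empty, PySem.Dict.keys_empty]
  · rw [hkd, hkv]; rw [PySem.Dict.keys_empty, PySem.Dict.keys_empty]
  · exact PySem.Dict.nodup_keys_foldl_insert_key aux Prod.fst (fun _ kv => [kv.2]) _ PySem.Dict.nodup_keys_empty
  · rw [hkv, ← hof]; rw [PySem.Dict.keys_empty, PySem.Dict.keys_empty]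
  · intro m hc
    rw [PySem.Dict.contains_eq_isSome_get?] at hc
    rcases ho : (aux.foldl (fun v kv => v.insert kv.1 [kv.2]) (PySem.Dict.empty : PySem.Dict String (List Int))).get? m with _ | l
    · rw [ho] at hc; simp at hc
    · have := hget m
      rw [ho] at this
      rcases hd : (aux.foldl (fun d kv => d.insert kv.1 kv.2) (PySem.Dict.empty : PySem.Dict String Int)).get? m with _ | x
      · rw [hd] at this; simp at this
      · rw [hd] at this
        obtain rfl : l = [x] := by simpa using this
        constructor <;>
          rw [PySem.Dict.getD_eq_get?_getD, PySem.Dict.getD_eq_get?_getD, ho, hd] <;>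
          simp [PySem.List.max?_id_cons, PySem.List.min?_id_cons]

-- one inner-loop step preserves the invariant
theorem pv_step_inv (aux : List (String × Int)) (ma mi : PySem.Dict String Int)
    (v : PySem.Dict String (List Int)) (h : calcInv aux ma mi v) (mr : String × Int) :
    calcInv aux (calc_p_stepA aux (ma, mi) mr).1 (calc_p_stepA aux (ma, mi) mr).2 (calc_p_stepB v mr) := by
  obtain ⟨hka, hki, hnd, hof, hval⟩ := h
  have hc : v.contains mr.1 = (aux.map Prod.fst).contains mr.1 := by
    rw [PySem.Dict.contains_eq_decide_mem_keys, hof]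
    have : mr.1 ∈ PySem.Set.ofList (aux.map Prod.fst) ↔ mr.1 ∈ aux.map Prod.fst :=
      PySem.Set.mem_ofList _ _
    simp [this]
  unfold calc_p_stepA calc_p_stepB
  rw [← hc]
  cases hg : (v.contains mr.1 && decide (mr.2 ≥ 0)) with
  | false => exact ⟨hka, hki, hnd, hof, hval⟩
  | true =>
    have hcv : v.contains mr.1 = true := by
      cases hb : v.contains mr.1
      · rw [hb] at hg; simp at hg
      · rfl
    obtain ⟨hmax, hmin⟩ := hval mr.1 hcv
    have hcma : ma.contains mr.1 = true := by
      rw [PySem.Dict.contains_eq_decide_mem_keys, hka]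
      rw [PySem.Dict.contains_eq_decide_mem_keys] at hcv
      exact hcv
    have hcmi : mi.contains mr.1 = true := by
      rw [PySem.Dict.contains_eq_decide_mem_keys, hki]
      rw [PySem.Dict.contains_eq_decide_mem_keys] at hcv
      exact hcv
    -- facts about the modified group dict
    have hkv' : (v.modify mr.1 [] (fun l => l ++ [mr.2])).keys = v.keys := by
      rw [PySem.Dict.keys_modify]
      exact PySem.Dict.keys_insert_of_contains v _ hcv
    have hcv' : ∀ m, (v.modify mr.1 [] (fun l => l ++ [mr.2])).contains m = v.contains m := by
      intro m
      rw [PySem.Dict.contains_modify]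
      by_cases hm : m = mr.1
      · subst hm; simp [hcv]
      · simp [hm]
    have hgd' : ∀ m, (v.modify mr.1 [] (fun l => l ++ [mr.2])).getD m []
        = if m = mr.1 then v.getD mr.1 [] ++ [mr.2] else v.getD m [] :=
      fun m => PySem.Dict.getD_modify v mr.1 m [] _
    -- normalize A's sequential update of the pair to componentwise form
    have hpair : (if (if ma.getD mr.1 0 < mr.2 then (ma.insert mr.1 mr.2, mi) else (ma, mi)).2.getD mr.1 0 > mr.2 then
            ((if ma.getD mr.1 0 < mr.2 then (ma.insert mr.1 mr.2, mi) else (ma, mi)).1,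
              (if ma.getD mr.1 0 < mr.2 then (ma.insert mr.1 mr.2, mi) else (ma, mi)).2.insert mr.1 mr.2)
          else if ma.getD mr.1 0 < mr.2 then (ma.insert mr.1 mr.2, mi) else (ma, mi))
        = ((if ma.getD mr.1 0 < mr.2 then ma.insert mr.1 mr.2 else ma),
           (if mi.getD mr.1 0 > mr.2 then mi.insert mr.1 mr.2 else mi)) := by
      by_cases h1 : ma.getD mr.1 0 < mr.2 <;> by_cases h2 : mi.getD mr.1 0 > mr.2 <;>
        simp [h1, h2]
    rw [hpair]
    refine ⟨?_, ?_, ?_, ?_, ?_⟩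
    · exact (show (if ma.getD mr.1 0 < mr.2 then ma.insert mr.1 mr.2 else ma).keys
          = (v.modify mr.1 [] (fun l => l ++ [mr.2])).keys by
        rw [hkv']
        split_ifs with h1
        · rw [PySem.Dict.keys_insert_of_contains ma _ hcma]; exact hka
        · exact hka)
    · exact (show (if mi.getD mr.1 0 > mr.2 then mi.insert mr.1 mr.2 else mi).keys
          = (v.modify mr.1 [] (fun l => l ++ [mr.2])).keys by
        rw [hkv']
        split_ifs with h1
        · rw [PySem.Dict.keys_insert_of_contains mi _ hcmi]; exact hki
        · exact hki)
    · exact (show (v.modify mr.1 [] (fun l => l ++ [mr.2])).keys.Nodup by rw [hkv']; exact hnd)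
    · exact (show (v.modify mr.1 [] (fun l => l ++ [mr.2])).keys
          = PySem.Set.ofList (aux.map Prod.fst) by rw [hkv']; exact hof)
    · intro m hm
      have hm' : (v.modify mr.1 [] (fun l => l ++ [mr.2])).contains m = true := hm
      rw [hcv' m] at hm'
      constructor
      · show PySem.List.max? ((v.modify mr.1 [] (fun l => l ++ [mr.2])).getD m []) (fun x => x)
            = some ((if ma.getD mr.1 0 < mr.2 then ma.insert mr.1 mr.2 else ma).getD m 0)
        rw [hgd' m]
        by_cases hmm : m = mr.1
        · subst hmm
          rw [if_pos rfl, pv_max_append _ _ mr.2 hmax]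
          split_ifs with h1
          · rw [PySem.Dict.getD_insert, if_pos rfl]; congr 1; omega
          · congr 1; omega
        · rw [if_neg hmm, (hval m hm').1]
          split_ifs with h1
          · rw [PySem.Dict.getD_insert, if_neg hmm]
          · rfl
      · show PySem.List.min? ((v.modify mr.1 [] (fun l => l ++ [mr.2])).getD m []) (fun x => x)
            = some ((if mi.getD mr.1 0 > mr.2 then mi.insert mr.1 mr.2 else mi).getD m 0)
        rw [hgd' m]
        by_cases hmm : m = mr.1
        · subst hmm
          rw [if_pos rfl, pv_min_append _ _ mr.2 hmin]
          split_ifs with h1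
          · rw [PySem.Dict.getD_insert, if_pos rfl]; congr 1; omega
          · congr 1; omega
        · rw [if_neg hmm, (hval m hm').2]
          split_ifs with h1
          · rw [PySem.Dict.getD_insert, if_neg hmm]
          · rfl

-- the inner (per-user) loop preserves the invariant
theorem pv_row_inner_inv (aux : List (String × Int)) (di : List (String × Int)) :
    ∀ (ma mi : PySem.Dict String Int) (v : PySem.Dict String (List Int)),
    calcInv aux ma mi v →
    calcInv aux (di.foldl (calc_p_stepA aux) (ma, mi)).1 (di.foldl (calc_p_stepA aux) (ma, mi)).2
      (di.foldl calc_p_stepB v) := by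
  induction di with
  | nil => intro ma mi v h; exact h
  | cons mr t ih =>
    intro ma mi v h
    have h1 := pv_step_inv aux ma mi v h mr
    simp only [List.foldl_cons]
    have : calc_p_stepA aux (ma, mi) mr
        = ((calc_p_stepA aux (ma, mi) mr).1, (calc_p_stepA aux (ma, mi) mr).2) := rfl
    rw [this]
    exact ih _ _ _ h1

-- the whole db loop preserves the invariant
theorem pv_db_inv (aux : List (String × Int)) (db : List (String × Option (List (String × Int)))) :
    ∀ (ma mi : PySem.Dict String Int) (v : PySem.Dict String (List Int)),
    calcInv aux ma mi v →
    calcInv aux (db.foldl (calc_p_rowA aux) (ma, mi)).1 (db.foldl (calc_p_rowA aux) (ma, mi)).2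
      (db.foldl calc_p_rowB v) := by
  induction db with
  | nil => intro ma mi v h; exact h
  | cons ud t ih =>
    intro ma mi v h
    simp only [List.foldl_cons]
    have h1 : calcInv aux (calc_p_rowA aux (ma, mi) ud).1 (calc_p_rowA aux (ma, mi) ud).2
        (calc_p_rowB v ud) := by
      unfold calc_p_rowA calc_p_rowB
      cases ud.2 with
      | none => exact h
      | some di => exact pv_row_inner_inv aux di ma mi v h
    have : calc_p_rowA aux (ma, mi) ud
        = ((calc_p_rowA aux (ma, mi) ud).1, (calc_p_rowA aux (ma, mi) ud).2) := rfl
    rw [this]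
    exact ih _ _ _ h1

-- a loop of inserts whose value depends only on the key builds the dedup-keyed table
theorem pv_insert_const_items (f : String → Int) :
    ∀ (l : List String) (d : PySem.Dict String Int), d.keys.Nodup →
    d.items = d.keys.map (fun m => (m, f m)) →
    (l.foldl (fun d m => d.insert m (f m)) d).items
      = (l.foldl PySem.Set.add d.keys).map (fun m => (m, f m)) := by
  intro l
  induction l with
  | nil => intro d _ h; exact h
  | cons m t ih =>
    intro d hnd h
    simp only [List.foldl_cons]
    cases hm : d.contains m with
    | true =>
      have hitems : (d.insert m (f m)).items = d.items := by
        rw [PySem.Dict.items_insert_of_contains d (f m) hm, h, List.map_map]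
        refine List.map_congr_left ?_
        intro k _
        simp only [Function.comp]
        by_cases hk : k = m
        · subst hk; simp
        · simp [hk]
      have hkeys : (d.insert m (f m)).keys = d.keys :=
        PySem.Dict.keys_insert_of_contains d (f m) hm
      have hadd : PySem.Set.add d.keys m = d.keys := by
        have : m ∈ d.keys := (PySem.Dict.contains_iff_mem_keys d m).mp hm
        simp [PySem.Set.add, this]
      have hrec := ih (d.insert m (f m)) (by rw [hkeys]; exact hnd) (by rw [hitems, hkeys, h])
      rw [hkeys] at hrec
      rw [hadd]
      exact hrec
    | false =>
      have hitems : (d.insert m (f m)).items = d.items ++ [(m, f m)] :=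
        PySem.Dict.items_insert_of_not_contains d (f m) hm
      have hkeys : (d.insert m (f m)).keys = d.keys ++ [m] :=
        PySem.Dict.keys_insert_of_not_contains d (f m) hm
      have hadd : PySem.Set.add d.keys m = d.keys ++ [m] := by
        have : ¬ m ∈ d.keys := by
          intro hmem
          rw [(PySem.Dict.contains_iff_mem_keys d m).mpr hmem] at hm
          cases hm
        simp [PySem.Set.add, this]
      have hrec := ih (d.insert m (f m)) (PySem.Dict.nodup_keys_insert d m (f m) hnd)
        (by rw [hitems, hkeys, h, List.map_append]; rfl)
      rw [hkeys] at hrec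
      rw [hadd]
      exact hrec

-- ===== VERDICT (by name: the statement is the Claim_ definition above) =====
theorem calc_p_spec : Claim_equal_calc_p := by
  intro db aux _
  show calc_p db aux = calc_p_alt db aux
  unfold calc_p calc_p_alt
  simp only []
  -- split A's paired seeding loop into two identical folds
  rw [PySem.List.foldl_prod_mk (f := fun (d : PySem.Dict String Int) (kv : String × Int) => d.insert kv.1 kv.2)
    (g := fun (d : PySem.Dict String Int) (kv : String × Int) => d.insert kv.1 kv.2)]
  set M0 := aux.foldl (fun (d : PySem.Dict String Int) kv => d.insert kv.1 kv.2) PySem.Dict.empty with hM0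
  set V0 := aux.foldl (fun (d : PySem.Dict String (List Int)) kv => d.insert kv.1 [kv.2]) PySem.Dict.empty with hV0
  have hinv0 : calcInv aux M0 M0 V0 := pv_seed_inv aux
  have hinv := pv_db_inv aux db M0 M0 V0 hinv0
  set fin := db.foldl (calc_p_rowA aux) (M0, M0) with hfin
  set vals := db.foldl calc_p_rowB V0 with hvals
  obtain ⟨hka, hki, hnd, hof, hval⟩ := hinv
  set F : String → Int := fun m => fin.1.getD m 0 - fin.2.getD m 0 with hF
  -- A's final loop
  have hA : (aux.foldl (fun (p : PySem.Dict String Int) kv => p.insert kv.1 (F kv.1)) PySem.Dict.empty).items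
      = ((aux.map Prod.fst).foldl PySem.Set.add []).map (fun m => (m, F m)) := by
    have h1 : aux.foldl (fun (p : PySem.Dict String Int) kv => p.insert kv.1 (F kv.1)) PySem.Dict.empty
        = (aux.map Prod.fst).foldl (fun (p : PySem.Dict String Int) m => p.insert m (F m)) PySem.Dict.empty := by
      rw [List.foldl_map]
    rw [h1]
    have := pv_insert_const_items F (aux.map Prod.fst) PySem.Dict.empty
      PySem.Dict.nodup_keys_empty (by rw [PySem.Dict.keys_empty]; rfl)
    rw [this, PySem.Dict.keys_empty]
  -- B's final loop
  have hfresh : ∀ a ∈ vals.items, (PySem.Dict.empty : PySem.Dict String Int).contains a.1 = false :=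
    fun a _ => PySem.Dict.contains_empty a.1
  have hndk : (vals.items.map Prod.fst).Nodup := hnd
  have hB : (vals.items.foldl (fun (p : PySem.Dict String Int) kv =>
        p.insert kv.1 ((PySem.List.max? kv.2 (fun x => x)).getD 0 - (PySem.List.min? kv.2 (fun x => x)).getD 0))
      PySem.Dict.empty).items
      = vals.items.map (fun a => (a.1,
          (PySem.List.max? a.2 (fun x => x)).getD 0 - (PySem.List.min? a.2 (fun x => x)).getD 0)) := by
    have := PySem.Dict.items_foldl_insert_fresh vals.items Prod.fst
      (fun a => (PySem.List.max? a.2 (fun x => x)).getD 0 - (PySem.List.min? a.2 (fun x => x)).getD 0)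
      PySem.Dict.empty hfresh hndk
    rw [this]; rfl
  rw [hA, hB]
  -- both sides are the keyed map over the same key list
  have hcongr : vals.items.map (fun a => (a.1,
        (PySem.List.max? a.2 (fun x => x)).getD 0 - (PySem.List.min? a.2 (fun x => x)).getD 0))
      = vals.items.map (fun a => (a.1, F a.1)) := by
    refine List.map_congr_left ?_
    intro a ha
    have hget : vals.get? a.1 = some a.2 := PySem.Dict.get?_of_mem_items vals ha hnd
    have hcont : vals.contains a.1 = true := by
      rw [PySem.Dict.contains_eq_isSome_get?, hget]; rfl
    obtain ⟨h1, h2⟩ := hval a.1 hcont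
    have hgd : vals.getD a.1 [] = a.2 := by
      rw [PySem.Dict.getD_eq_get?_getD, hget]; rfl
    rw [hgd] at h1 h2
    rw [h1, h2]
    rfl
  rw [hcongr]
  have hkeysmap : vals.items.map (fun a => (a.1, F a.1))
      = vals.keys.map (fun m => (m, F m)) := by
    show _ = (vals.items.map Prod.fst).map (fun m => (m, F m))
    rw [List.map_map]
    rfl
  rw [hkeysmap, hof, PySem.Set.ofList_eq_foldl]
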